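-- pv_equiv track=rewrite | github.com/xiaojam/intelligent-systems | fuzzy-weighted-balanced-scorecard/fz_aspect_categorizer.py | categorize_review
-- ===== SOURCE A (Python) =====
-- def categorize_review(text, aspect_keywords):
--     detected_aspects = []
--     for aspect, keywords in aspect_keywords.items():
--         if any(keyword in text for keyword in keywords):
--             detected_aspects.append(aspect)
--     if not detected_aspects:
--         return ['Umum']
--     return detected_aspects
-- ===== SOURCE B (Python) =====
-- def categorize_review(text, aspect_keywords):
--     max_len = 0
--     for keywords in aspect_keywords.values():
--         for kw in keywords:
--             if len(kw) > max_len: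
--                 max_len = len(kw)
--     n = len(text)
--     subs = set()
--     for i in range(n + 1):
--         for j in range(i, min(i + max_len, n) + 1):
--             subs.add(text[i:j])
--     detected = [aspect for aspect, keywords in aspect_keywords.items()
--                 if any(kw in subs for kw in keywords)]
--     if not detected:
--         return ['Umum']
--     return detected
-- ===== Notes on version B (the rewrite author's own statement) =====
-- stated objective: faster
-- what changed: B precomputes one hash set of all substrings of text up to the maximal keyword length, so each keyword test is a set lookup instead of A's scan of text per keyword.
import Mathlib
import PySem

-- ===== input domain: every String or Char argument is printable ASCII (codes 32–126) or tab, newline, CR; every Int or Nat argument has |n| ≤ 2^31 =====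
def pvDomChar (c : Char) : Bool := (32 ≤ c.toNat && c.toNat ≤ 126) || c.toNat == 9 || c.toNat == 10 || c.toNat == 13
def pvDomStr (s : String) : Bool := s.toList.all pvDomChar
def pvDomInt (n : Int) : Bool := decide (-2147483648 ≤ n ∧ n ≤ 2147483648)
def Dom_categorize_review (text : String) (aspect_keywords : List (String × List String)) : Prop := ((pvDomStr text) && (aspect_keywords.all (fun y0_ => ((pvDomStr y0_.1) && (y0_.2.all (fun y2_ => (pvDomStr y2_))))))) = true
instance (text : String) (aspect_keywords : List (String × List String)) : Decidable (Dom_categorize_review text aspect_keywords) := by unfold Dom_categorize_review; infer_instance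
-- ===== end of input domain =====

-- B replaces A's per-keyword substring scans by one precomputed set of all substrings of
-- text up to the maximal keyword length, so each keyword test becomes a set lookup
-- (objective: faster; measured faster in a timing run; same results proved equal).

-- ===== PORT A =====
def categorize_review (text : String) (aspect_keywords : List (String × List String)) : List String :=
  let detected_aspects :=
    aspect_keywords.foldl (fun acc p =>
      if p.2.any (fun keyword => PySem.Str.isIn keyword text) then acc ++ [p.1] else acc) []
  if detected_aspects = [] then ["Umum"] else detected_aspects

-- ===== PORT B =====
-- max keyword length (the two nested 'for' loops with a running maximum)
def pvMaxLen (aspect_keywords : List (String × List String)) : Nat :=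
  aspect_keywords.foldl (fun m p =>
    p.2.foldl (fun m kw => if kw.length > m then kw.length else m) m) 0

-- the set comprehension {text[i:j] | 0 ≤ i ≤ n, i ≤ j ≤ min(i+max_len, n)}
def pvSubs (text : String) (max_len : Nat) : PySem.Set String :=
  (PySem.List.pyRange 0 ((text.length : Int) + 1) 1).foldl (fun s i =>
    (PySem.List.pyRange i (min (i + (max_len : Int)) (text.length : Int) + 1) 1).foldl
      (fun s j => PySem.Set.add s (PySem.Str.slice text (some i) (some j))) s)
    PySem.Set.empty

def categorize_review_alt (text : String) (aspect_keywords : List (String × List String)) : List String :=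
  let subs := pvSubs text (pvMaxLen aspect_keywords)
  let detected :=
    (aspect_keywords.filter (fun p => p.2.any (fun kw => PySem.Set.contains subs kw))).map (·.1)
  if detected = [] then ["Umum"] else detected

-- ===== PRECONDITION & SPEC =====
def Spec_categorize_review (text : String) (aspect_keywords : List (String × List String)) (out : List String) : Prop := out = categorize_review_alt text aspect_keywords
instance (text : String) (aspect_keywords : List (String × List String)) (out : List String) : Decidable (Spec_categorize_review text aspect_keywords out) := by unfold Spec_categorize_review; infer_instance

-- ===== CLAIM (what is proved, stated in full; the proofs are below) =====
def Claim_equal_categorize_review : Prop := ∀ (text : String) (aspect_keywords : List (String × List String)), Dom_categorize_review text aspect_keywords → Spec_categorize_review text aspect_keywords (categorize_review text aspect_keywords)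

-- ===== LEMMAS AND PROOFS =====

-- generic: membership after a fold of 'add'-like steps
theorem pv_mem_foldl {α β : Type} [BEq α] [LawfulBEq α] (g : PySem.Set α → β → PySem.Set α)
    (P : β → α → Prop) (hg : ∀ s b y, y ∈ g s b ↔ y ∈ s ∨ P b y) :
    ∀ (l : List β) (s : PySem.Set α) (y : α), y ∈ l.foldl g s ↔ y ∈ s ∨ ∃ b ∈ l, P b y := by
  intro l
  induction l with
  | nil => simp
  | cons b t ih =>
    intro s y
    simp only [List.foldl_cons, ih, hg, List.mem_cons]
    constructor
    · rintro ((h | h) | ⟨c, hc, hp⟩)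
      · exact Or.inl h
      · exact Or.inr ⟨b, Or.inl rfl, h⟩
      · exact Or.inr ⟨c, Or.inr hc, hp⟩
    · rintro (h | ⟨c, (rfl | hc), hp⟩)
      · exact Or.inl (Or.inl h)
      · exact Or.inl (Or.inr hp)
      · exact Or.inr ⟨c, hc, hp⟩

theorem pvSubs_mem (text : String) (M : Nat) (kw : String) (hk : kw.length ≤ M) :
    kw ∈ pvSubs text M ↔ kw.toList <:+: text.toList := by
  have hmem : kw ∈ pvSubs text M ↔ ∃ i ∈ PySem.List.pyRange 0 ((text.length : Int) + 1) 1,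
      ∃ j ∈ PySem.List.pyRange i (min (i + (M : Int)) (text.length : Int) + 1) 1,
        kw = PySem.Str.slice text (some i) (some j) := by
    unfold pvSubs
    rw [pv_mem_foldl (fun s i =>
        (PySem.List.pyRange i (min (i + (M : Int)) (text.length : Int) + 1) 1).foldl
          (fun s j => PySem.Set.add s (PySem.Str.slice text (some i) (some j))) s)
      (fun i y => ∃ j ∈ PySem.List.pyRange i (min (i + (M : Int)) (text.length : Int) + 1) 1,
        y = PySem.Str.slice text (some i) (some j))
      (fun s i y => pv_mem_foldl _ (fun j y => y = PySem.Str.slice text (some i) (some j))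
        (fun s j y => PySem.Set.mem_add s _ y) _ s y)]
    simp [PySem.Set.empty]
  rw [hmem]
  constructor
  · rintro ⟨i, hi, j, hj, rfl⟩
    rw [PySem.List.mem_pyRange_one] at hi hj
    have h0i : (0:Int) ≤ i := hi.1
    have h0j : (0:Int) ≤ j := le_trans h0i hj.1
    rw [PySem.Str.toList_slice, PySem.Chars.slice_eq_listSlice,
        PySem.List.slice_toNat _ h0i h0j]
    exact ((List.take_prefix _ _).isInfix).trans (List.drop_suffix _ _).isInfix
  · rintro ⟨s, t, hst⟩
    refine ⟨(s.length : Int), ?_, (s.length : Int) + (kw.length : Int), ?_, ?_⟩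
    · rw [PySem.List.mem_pyRange_one]
      have : s.length + kw.toList.length + t.length = text.toList.length := by
        rw [← hst]; simp; omega
      have hlen : kw.toList.length = kw.length := by simp
      constructor
      · positivity
      · simp only [String.length]; omega
    · rw [PySem.List.mem_pyRange_one]
      have : s.length + kw.toList.length + t.length = text.toList.length := by
        rw [← hst]; simp; omega
      have hlen : kw.toList.length = kw.length := by simp
      constructor
      · omega
      · simp only [String.length]
        omega
    · rw [← String.toList_inj, PySem.Str.toList_slice, PySem.Chars.slice_eq_listSlice,
        PySem.List.slice_natCast_add, ← hst]
      simp

theorem pvContains_eq_isIn (text : String) (M : Nat) (kw : String) (hk : kw.length ≤ M) :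
    PySem.Set.contains (pvSubs text M) kw = PySem.Str.isIn kw text := by
  rw [Bool.eq_iff_iff, PySem.Set.contains_iff, PySem.Str.isIn_iff_infix]
  exact pvSubs_mem text M kw hk

-- every keyword's length is bounded by the running maximum pvMaxLen
theorem pvMaxLen_inner (l : List String) :
    ∀ m : Nat, m ≤ l.foldl (fun m kw => if kw.length > m then kw.length else m) m ∧
      ∀ kw ∈ l, kw.length ≤ l.foldl (fun m kw => if kw.length > m then kw.length else m) m := by
  induction l with
  | nil => simp
  | cons a t ih =>
    intro m
    obtain ⟨h1, h2⟩ := ih (if a.length > m then a.length else m)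
    refine ⟨le_trans (by split <;> omega) h1, ?_⟩
    intro kw hkw
    rcases List.mem_cons.mp hkw with rfl | hkw'
    · exact le_trans (by split <;> omega) h1
    · exact h2 kw hkw'

theorem pvMaxLen_outer_le (t : List (String × List String)) :
    ∀ m : Nat, m ≤ t.foldl (fun m p => p.2.foldl (fun m kw => if kw.length > m then kw.length else m) m) m := by
  induction t with
  | nil => simp
  | cons b u ih =>
    intro m
    simp only [List.foldl_cons]
    exact le_trans (pvMaxLen_inner b.2 m).1 (ih _)

theorem pvMaxLen_bound (aks : List (String × List String)) :
    ∀ m : Nat, ∀ p ∈ aks, ∀ kw ∈ p.2, kw.length ≤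
      aks.foldl (fun m p => p.2.foldl (fun m kw => if kw.length > m then kw.length else m) m) m := by
  induction aks with
  | nil => simp
  | cons a t ih =>
    intro m p hp kw hkw
    simp only [List.foldl_cons]
    rcases List.mem_cons.mp hp with rfl | hp
    · exact le_trans ((pvMaxLen_inner p.2 m).2 kw hkw) (pvMaxLen_outer_le t _)
    · exact ih _ p hp kw hkw

-- ===== VERDICT (by name: the statement is the Claim_ definition above) =====
theorem categorize_review_spec : Claim_equal_categorize_review := by
  intro text aks _
  unfold Spec_categorize_review categorize_review categorize_review_alt
  have hcond : ∀ (acc : List String), ∀ p ∈ aks,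
      (if p.2.any (fun keyword => PySem.Str.isIn keyword text) then acc ++ [p.1] else acc)
      = (if p.2.any (fun kw => PySem.Set.contains (pvSubs text (pvMaxLen aks)) kw) then acc ++ [p.1] else acc) := by
    intro acc p hp
    have : (p.2.any (fun keyword => PySem.Str.isIn keyword text))
        = (p.2.any (fun kw => PySem.Set.contains (pvSubs text (pvMaxLen aks)) kw)) := by
      rw [Bool.eq_iff_iff, List.any_eq_true, List.any_eq_true]
      constructor <;> rintro ⟨kw, hkw, h⟩ <;>
        refine ⟨kw, hkw, ?_⟩ <;>
        rw [pvContains_eq_isIn text (pvMaxLen aks) kw (pvMaxLen_bound aks 0 p hp kw hkw)] at * <;>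
        assumption
    rw [this]
  rw [PySem.List.foldl_congr_mem aks _ _ [] hcond,
      PySem.List.foldl_append_if (fun p => p.2.any fun kw => PySem.Set.contains (pvSubs text (pvMaxLen aks)) kw) (fun p => p.1) aks []]
  simp
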